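-- pv_equiv track=rewrite | github.com/lejacpCJ/Leetcode | 2000-2999/2411/2411.py | smallestSubarrays
-- ===== SOURCE A (Python) =====
-- from typing import List
--
-- def smallestSubarrays(nums: List[int]) -> List[int]:
--     n = len(nums)
--     # Store the rightmost position where each bit is set
--     bit_positions = [0] * 32
--     result = [0] * n
--
--     # Process from right to left
--     for i in range(n - 1, -1, -1):
--         # Update bit positions for current number
--         for bit in range(32):
--             if nums[i] & (1 << bit):
--                 bit_positions[bit] = i
--
--         # Find the furthest bit position needed for maximum OR
--         # This determines the minimum subarray length
--         result[i] = max(1, max(bit_positions) - i + 1)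
--
--     return result
-- ===== SOURCE B (Python) =====
-- from typing import List
--
-- def smallestSubarrays(nums: List[int]) -> List[int]:
--     # Brute-force re-implementation: for each start index i, directly search,
--     # per bit, for the nearest index >= i where that bit occurs, and take the
--     # furthest such index.  No shared state across iterations.
--     n = len(nums)
--     res = []
--     for i in range(n):
--         far = i
--         for b in range(32):
--             k = i
--             while k < n and nums[k] & (1 << b) == 0:
--                 k += 1
--             if k < n:
--                 far = max(far, k)
--         res.append(far - i + 1)
--     return res
-- ===== Notes on version B (the rewrite author's own statement) =====
-- stated objective: alternative
-- what changed: Replaces the right-to-left sweep with a mutable per-bit rightmost-position table by an independent per-index brute-force search: for each start i and each bit, scan forward for the nearest index carrying that bit and take the furthest one; no state is shared between iterations.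
import Mathlib
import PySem

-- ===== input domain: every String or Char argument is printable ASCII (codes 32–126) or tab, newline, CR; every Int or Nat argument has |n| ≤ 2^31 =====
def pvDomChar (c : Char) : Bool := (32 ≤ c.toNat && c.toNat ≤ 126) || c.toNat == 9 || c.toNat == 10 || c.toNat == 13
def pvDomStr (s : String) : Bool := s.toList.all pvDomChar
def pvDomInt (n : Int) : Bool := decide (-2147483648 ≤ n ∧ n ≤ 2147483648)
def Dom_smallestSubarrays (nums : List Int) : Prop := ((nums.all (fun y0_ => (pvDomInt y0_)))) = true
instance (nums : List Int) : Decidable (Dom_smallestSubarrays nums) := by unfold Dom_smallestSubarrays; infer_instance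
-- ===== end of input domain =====

-- B replaces A's right-to-left sweep with a shared bit-position table by an independent
-- per-index brute-force search (per bit, nearest occurrence from i); alternative, not faster.


-- shared bit test: Python's 'x & (1 << b)' being truthy (both sources use this expression)
def pvBitTest (x : Int) (b : Nat) : Bool := PySem.Int.band x ((1:Int) <<< b) != 0

-- ===== PORT A =====
-- one iteration of A's 'for i in range(n-1, -1, -1)' loop; state = (bit_positions, result)
def pvAStep (nums : List Int) (st : List Int × List Int) (i : Int) : List Int × List Int :=
  let x := PySem.List.pyGetD nums i 0      -- nums[i], i always in range here
  let pos := (List.range 32).foldl (fun p bit => if pvBitTest x bit then p.set bit i else p) st.1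
  let m := (PySem.List.max? pos (fun v => v)).getD 0   -- max(bit_positions); list has 32 elements, never empty
  (pos, PySem.List.pySetD st.2 i (max 1 (m - i + 1)))

def smallestSubarrays (nums : List Int) : List Int :=
  let n : Int := nums.length
  ((PySem.List.pyRange (n - 1) (-1) (-1)).foldl (pvAStep nums)
      (List.replicate 32 0, List.replicate nums.length 0)).2

-- ===== PORT B =====
-- the 'while k < n and nums[k] & (1 << b) == 0: k += 1' loop of Source B
def pvBFind (nums : List Int) (b : Nat) (k : Nat) : Nat :=
  if h : k < nums.length then
    if pvBitTest nums[k] b then k else pvBFind nums b (k + 1)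
  else k
termination_by nums.length - k

def smallestSubarrays_alt (nums : List Int) : List Int :=
  (List.range nums.length).map (fun i =>
    let far := (List.range 32).foldl (fun far b =>
      let k := pvBFind nums b i
      if k < nums.length then max far k else far) i
    ((far : Int) - (i : Int) + 1))

-- ===== PRECONDITION & SPEC =====
def Spec_smallestSubarrays (nums : List Int) (out : List Int) : Prop := out = smallestSubarrays_alt nums
instance (nums : List Int) (out : List Int) : Decidable (Spec_smallestSubarrays nums out) := by unfold Spec_smallestSubarrays; infer_instance

-- ===== CLAIM (what is proved, stated in full; the proofs are below) =====
def Claim_equal_smallestSubarrays : Prop := ∀ (nums : List Int), Dom_smallestSubarrays nums → Spec_smallestSubarrays nums (smallestSubarrays nums)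

-- ===== LEMMAS AND PROOFS =====

-- model of A's bit_positions entry after the iteration for index i has run:
-- nearest index ≥ i carrying bit b (as Int), or the stale initial 0 if the suffix has none
def pvE (nums : List Int) (i : Nat) (b : Nat) : Int :=
  if pvBFind nums b i < nums.length then ((pvBFind nums b i : Nat) : Int) else 0

-- B's per-index value
def pvVal (nums : List Int) (i : Nat) : Int :=
  ((List.range 32).foldl (fun far b =>
      let k := pvBFind nums b i
      if k < nums.length then max far k else far) i : Nat) - (i : Int) + 1

theorem pvBFind_of_ge (nums : List Int) (b k : Nat) (h : ¬ k < nums.length) :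
    pvBFind nums b k = k := by
  unfold pvBFind; simp [h]

-- the fold of conditional List.set preserves length
theorem pv_foldl_set_length (c : Nat → Bool) (v : Int) :
    ∀ (m : Nat) (p : List Int),
      ((List.range m).foldl (fun q b => if c b then q.set b v else q) p).length = p.length := by
  intro m
  induction m with
  | zero => intro p; simp
  | succ m ih =>
    intro p
    rw [List.range_succ, List.foldl_append]
    simp only [List.foldl_cons, List.foldl_nil]
    split <;> simp [ih]

-- its pointwise effect
theorem pv_foldl_set_getElem (c : Nat → Bool) (v : Int) :
    ∀ (m : Nat) (p : List Int) (j : Nat) (hj : j < p.length),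
      ((List.range m).foldl (fun q b => if c b then q.set b v else q) p)[j]'(by rw [pv_foldl_set_length]; exact hj)
        = if j < m ∧ c j then v else p[j] := by
  intro m
  induction m with
  | zero => intro p j hj; simp
  | succ m ih =>
    intro p j hj
    simp only [List.range_succ, List.foldl_append, List.foldl_cons, List.foldl_nil]
    by_cases hc : c m
    · simp only [hc, if_true]
      rw [List.getElem_set]
      by_cases hjm : m = j
      · subst hjm; simp [hc]
      · rw [if_neg hjm, ih _ _ hj]
        by_cases hlt : j < m
        · simp [hlt, show j < m + 1 by omega]
        · have : ¬ j < m + 1 ∨ j = m := by omega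
          rcases this with h' | h'
          · simp [hlt, h']
          · exact absurd h'.symm hjm
    · simp only [hc, Bool.false_eq_true, if_false]
      rw [ih _ _ hj]
      by_cases hlt : j < m
      · simp [hlt, show j < m + 1 by omega]
      · by_cases hjm : j = m
        · subst hjm; simp [hc]
        · have : ¬ j < m + 1 := by omega
          simp [hlt, this]

-- A's inner 'for bit in range(32)' loop turns the table for i+1 into the table for i
theorem pv_inner_loop (nums : List Int) (i : Nat) (hi : i < nums.length) :
    (List.range 32).foldl
        (fun p bit => if pvBitTest (PySem.List.pyGetD nums (i : Int) 0) bit then p.set bit (i : Int) else p)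
        ((List.range 32).map (pvE nums (i + 1)))
      = (List.range 32).map (pvE nums i) := by
  have hx : PySem.List.pyGetD nums (i : Int) 0 = nums[i] := by
    rw [PySem.List.pyGetD_natCast, List.getD_eq_getElem _ _ hi]
  apply List.ext_getElem
  · rw [pv_foldl_set_length]; simp
  · intro j hj hj'
    have hj32 : j < 32 := by simpa using hj'
    rw [pv_foldl_set_getElem _ _ _ _ j (by simpa using hj32)]
    simp only [List.getElem_map, List.getElem_range]
    rw [hx]
    unfold pvE
    rw [show pvBFind nums j i = if h : i < nums.length then (if pvBitTest nums[i] j then i else pvBFind nums j (i+1)) else i from by rw [pvBFind]]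
    by_cases ht : pvBitTest nums[i] j
    · simp [hi, ht, hj32]
    · simp [hi, ht, hj32]

-- value of Python's max() on a nonempty list of nonnegative ints, as a fold from 0
theorem pv_max_getD (l : List Int) (hpos : ∀ x ∈ l, 0 ≤ x) :
    (PySem.List.max? l (fun v => v)).getD 0 = l.foldl max 0 := by
  cases l with
  | nil => simp [PySem.List.max?]
  | cons x t =>
    have hx : (0 : Int) ≤ x := hpos x (by simp)
    rw [PySem.List.max?_id_cons, Option.getD_some]
    simp only [List.foldl_cons]
    rw [max_eq_right hx]

-- the two per-index folds agree: B's Nat fold (started at i) is max i of A's Int max-fold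
theorem pv_fold_agree (nums : List Int) (i : Nat) : ∀ (m : Nat),
    (((List.range m).foldl (fun far b =>
        let k := pvBFind nums b i
        if k < nums.length then max far k else far) i : Nat) : Int)
      = max (i : Int) ((List.range m).foldl (fun M b => max M (pvE nums i b)) 0)
    ∧ 0 ≤ (List.range m).foldl (fun M b => max M (pvE nums i b)) 0 := by
  intro m
  induction m with
  | zero => simp
  | succ m ih =>
    obtain ⟨ih1, ih2⟩ := ih
    rw [List.range_succ, List.foldl_append, List.foldl_append]
    simp only [List.foldl_cons, List.foldl_nil]
    by_cases hk : pvBFind nums m i < nums.length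
    · have hE : pvE nums i m = ((pvBFind nums m i : Nat) : Int) := by unfold pvE; rw [if_pos hk]
      have h0 : (0 : Int) ≤ ((pvBFind nums m i : Nat) : Int) := by positivity
      constructor
      · simp only [hk, if_true, hE]
        push_cast
        rw [ih1, max_assoc]
      · rw [hE]
        exact le_trans ih2 (le_max_left _ _)
    · have hE : pvE nums i m = 0 := by unfold pvE; rw [if_neg hk]
      constructor
      · simp only [hk, if_false, hE]
        rw [max_eq_left ih2, ih1]
      · rw [hE, max_eq_left ih2]; exact ih2

-- one step of A's outer loop, on model states
theorem pv_outer_step (nums : List Int) (i : Nat) (hi : i < nums.length) :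
    pvAStep nums
        ((List.range 32).map (pvE nums (i + 1)),
         (List.range nums.length).map (fun t => if i + 1 ≤ t then pvVal nums t else 0))
        (i : Int)
      = ((List.range 32).map (pvE nums i),
         (List.range nums.length).map (fun t => if i ≤ t then pvVal nums t else 0)) := by
  unfold pvAStep
  simp only []
  rw [pv_inner_loop nums i hi]
  have hmax : (PySem.List.max? ((List.range 32).map (pvE nums i)) (fun v => v)).getD 0
      = (List.range 32).foldl (fun M b => max M (pvE nums i b)) 0 := by
    rw [pv_max_getD, List.foldl_map]
    intro x hx
    obtain ⟨b, _, rfl⟩ := List.mem_map.mp hx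
    unfold pvE
    split <;> positivity
  rw [hmax]
  refine Prod.ext rfl ?_
  simp only []
  rw [PySem.List.pySetD_natCast]
  apply List.ext_getElem
  · simp
  · intro j hj hj'
    have hjn : j < nums.length := by simpa using hj'
    rw [List.getElem_set]
    simp only [List.getElem_map, List.getElem_range]
    by_cases hij : i = j
    · subst hij
      simp only [le_refl, if_pos]
      obtain ⟨h1, h2⟩ := pv_fold_agree nums i 32
      unfold pvVal
      rw [h1]
      rcases max_cases ((i : Int)) ((List.range 32).foldl (fun M b => max M (pvE nums i b)) 0) with ⟨he, hle⟩ | ⟨he, hle⟩ <;>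
        rcases max_cases (1 : Int) ((List.range 32).foldl (fun M b => max M (pvE nums i b)) 0 - (i : Int) + 1) with ⟨he', hle'⟩ | ⟨he', hle'⟩ <;>
        omega
    · rw [if_neg hij]
      by_cases hle : i ≤ j
      · rw [if_pos hle, if_pos (by omega : i + 1 ≤ j)]
      · rw [if_neg hle, if_neg (by omega : ¬ i + 1 ≤ j)]

-- the countdown fold, by induction on the start index
theorem pv_outer_loop (nums : List Int) : ∀ (i : Nat), i ≤ nums.length →
    (PySem.List.pyRange ((i : Int) - 1) (-1) (-1)).foldl (pvAStep nums)
        ((List.range 32).map (pvE nums i),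
         (List.range nums.length).map (fun t => if i ≤ t then pvVal nums t else 0))
      = ((List.range 32).map (pvE nums 0),
         (List.range nums.length).map (fun t => if 0 ≤ t then pvVal nums t else 0)) := by
  intro i
  induction i with
  | zero => intro _; rw [PySem.List.pyRange_neg_one_eq_nil (by norm_num)]; simp
  | succ i ih =>
    intro hle
    have hcons : PySem.List.pyRange (((i : Nat) + 1 : Int) - 1) (-1) (-1)
        = (i : Int) :: PySem.List.pyRange ((i : Int) - 1) (-1) (-1) := by
      rw [show (((i : Nat) + 1 : Int) - 1) = (i : Int) by ring]
      exact PySem.List.pyRange_neg_one_cons (by omega)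
    push_cast
    push_cast at hcons
    rw [hcons, List.foldl_cons, pv_outer_step nums i (by omega)]
    exact ih (by omega)

-- the two initial replicate-lists are the model state at i = n
theorem pv_init_pos (nums : List Int) :
    (List.replicate 32 (0:Int)) = (List.range 32).map (pvE nums nums.length) := by
  apply List.ext_getElem
  · simp
  · intro j hj hj'
    simp only [List.getElem_replicate, List.getElem_map, List.getElem_range]
    unfold pvE
    rw [pvBFind_of_ge nums j nums.length (by omega)]
    simp

theorem pv_init_res (nums : List Int) :
    (List.replicate nums.length (0:Int))
      = (List.range nums.length).map (fun t => if nums.length ≤ t then pvVal nums t else 0) := by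
  apply List.ext_getElem
  · simp
  · intro j hj hj'
    have : j < nums.length := by simpa using hj
    simp only [List.getElem_replicate, List.getElem_map, List.getElem_range]
    rw [if_neg (by omega)]

-- ===== VERDICT (by name: the statement is the Claim_ definition above) =====
theorem smallestSubarrays_spec : Claim_equal_smallestSubarrays := by
  intro nums _
  unfold Spec_smallestSubarrays smallestSubarrays smallestSubarrays_alt
  simp only []
  rw [pv_init_pos nums, pv_init_res nums,
      pv_outer_loop nums nums.length (le_refl _)]
  apply List.map_congr_left
  intro t _
  rw [if_pos (Nat.zero_le t)]
  unfold pvVal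
  simp
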